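-- pv_equiv track=rewrite | github.com/singleron-RD/CeleScope | celescope/tools/parse_chemistry.py | create_mismatch_seqs
-- ===== SOURCE A (Python) =====
-- import itertools
--
-- def create_mismatch_seqs(seq: str, max_mismatch=1, allowed_bases="ACGTN") -> set[str]:
--     """Create all sequences within a specified number of mismatches from the input sequence.
--
--     >>> answer = set(["TCG", "AAG", "ACC", "ATG", "ACT", "ACN", "GCG", "ANG", "ACA", "ACG", "CCG", "AGG", "NCG"])
--     >>> seq_set = create_mismatch_seqs("ACG")
--     >>> seq_set == answer
--     True
--     >>> seq_set = create_mismatch_seqs("ACG", max_mismatch=0)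
--     >>> seq_set == set(["ACG"])
--     True
--     """
--     if max_mismatch < 0:
--         raise ValueError("max_mismatch must be non-negative")
--     if max_mismatch > len(seq):
--         raise ValueError(
--             f"max_mismatch ({max_mismatch}) cannot be greater than the sequence length ({len(seq)})"
--         )
--
--     result = set()
--     for n_mismatch in range(max_mismatch + 1):  # 包括0到max_mismatch
--         for locs in itertools.combinations(range(len(seq)), n_mismatch):
--             seq_locs = [
--                 list(allowed_bases) if i in locs else [base]
--                 for i, base in enumerate(seq)
--             ]
--             result.update("".join(p) for p in itertools.product(*seq_locs))
--     return result
-- ===== SOURCE B (Python) =====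
-- def create_mismatch_seqs(seq: str, max_mismatch=1, allowed_bases="ACGTN") -> set[str]:
--     """Recursive re-implementation: enumerate each reachable string once, grouped
--     by the set of substituted positions, instead of combinations x full Cartesian
--     products relying on set-dedup."""
--     if max_mismatch < 0:
--         raise ValueError("max_mismatch must be non-negative")
--     if max_mismatch > len(seq):
--         raise ValueError(
--             f"max_mismatch ({max_mismatch}) cannot be greater than the sequence length ({len(seq)})"
--         )
--
--     def groups(rest, budget):
--         # variants of `rest` with exactly `budget` substitutions (to bases != the
--         # original), one group per choice of substituted positions
--         if budget == 0:
--             return [[rest]]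
--         c, tail = rest[0], rest[1:]
--         out = [[b + t for b in allowed_bases if b != c for t in g]
--                for g in groups(tail, budget - 1)]
--         if len(tail) >= budget:
--             out += [[c + t for t in g] for g in groups(tail, budget)]
--         return out
--
--     result = set()
--     for d in range(max_mismatch + 1):
--         for g in groups(seq, d):
--             result.update(g)
--     return result
-- ===== Notes on version B (the rewrite author's own statement) =====
-- stated objective: alternative
-- what changed: Replaces the combinations-of-positions x full Cartesian-product enumeration (which regenerates every lower-distance string and relies on the set for dedup) by a recursion over positions that builds each exact-distance variant group directly, substituting only bases different from the original so each string is produced once per support.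
import Mathlib
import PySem

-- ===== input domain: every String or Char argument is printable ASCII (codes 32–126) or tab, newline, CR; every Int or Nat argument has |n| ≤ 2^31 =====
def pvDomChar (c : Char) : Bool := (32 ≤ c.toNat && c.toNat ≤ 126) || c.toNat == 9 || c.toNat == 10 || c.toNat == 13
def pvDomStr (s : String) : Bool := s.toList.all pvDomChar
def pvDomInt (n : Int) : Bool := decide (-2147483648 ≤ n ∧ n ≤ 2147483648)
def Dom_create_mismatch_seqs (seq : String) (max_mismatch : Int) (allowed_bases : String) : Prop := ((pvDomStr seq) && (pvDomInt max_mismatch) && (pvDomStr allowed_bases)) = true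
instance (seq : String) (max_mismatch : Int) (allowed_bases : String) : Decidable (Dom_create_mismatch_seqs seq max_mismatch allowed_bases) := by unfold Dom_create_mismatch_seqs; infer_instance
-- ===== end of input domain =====

-- B replaces A's combinations × full-Cartesian-product enumeration (dedup via the set)
-- by a recursion over positions that builds each exact-distance variant group directly.

-- ===== PORT A =====
-- itertools.combinations(pool, r): tuples in lexicographic emission order
def combA : List Int → Nat → List (List Int)
  | _, 0 => [[]]
  | [], _ + 1 => []
  | x :: xs, r + 1 => (combA xs r).map (fun t => x :: t) ++ combA xs (r + 1)

-- itertools.product(*ls): rightmost factor varies fastest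
def prodA : List (List Char) → List (List Char)
  | [] => [[]]
  | l :: ls => l.flatMap (fun c => (prodA ls).map (fun t => c :: t))

-- A: for n_mismatch in range(max+1): for locs in combinations: set-update with the
-- full product.  "".join over a tuple of single-char strings is ported as String.ofList
-- of the char tuple (exact).
def create_mismatch_seqs (seq : String) (max_mismatch : Int) (allowed_bases : String) : List String :=
  (PySem.List.pyRange 0 (max_mismatch + 1) 1).foldl (fun result n =>
    (combA (PySem.List.pyRange 0 (seq.toList.length : Int) 1) n.toNat).foldl (fun result locs =>
      let seq_locs := (PySem.List.enumerate seq.toList).map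
        (fun ib => if ib.1 ∈ locs then allowed_bases.toList else [ib.2])
      PySem.Set.update result ((prodA seq_locs).map (fun p => String.ofList p))) result) []

-- ===== PORT B =====
-- groups(rest, budget): variants of rest with exactly `budget` substitutions, one
-- group per choice of substituted positions; string concatenation is ported at the
-- List Char level, String.ofList applied when a group is added to the set (exact).
def goB (ab : List Char) : List Char → Nat → List (List (List Char))
  | rest, 0 => [[rest]]
  | [], _ + 1 => []
  | c :: tail, b + 1 =>
    (goB ab tail b).map (fun g => (ab.filter (fun x => x != c)).flatMap (fun x => g.map (fun t => x :: t))) ++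
    (if b + 1 ≤ tail.length then (goB ab tail (b + 1)).map (fun g => g.map (fun t => c :: t)) else [])

def create_mismatch_seqs_alt (seq : String) (max_mismatch : Int) (allowed_bases : String) : List String :=
  (PySem.List.pyRange 0 (max_mismatch + 1) 1).foldl (fun result d =>
    (goB allowed_bases.toList seq.toList d.toNat).foldl
      (fun result g => PySem.Set.update result (g.map (fun p => String.ofList p))) result) []

-- ===== PRECONDITION & SPEC =====
-- Pre_ excludes exactly the two ValueError branches of A (max_mismatch < 0 or
-- max_mismatch > len(seq)); B raises the same errors there.
def Pre_create_mismatch_seqs (seq : String) (max_mismatch : Int) (allowed_bases : String) : Prop :=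
  0 ≤ max_mismatch ∧ max_mismatch ≤ (seq.toList.length : Int)
instance (seq : String) (max_mismatch : Int) (allowed_bases : String) : Decidable (Pre_create_mismatch_seqs seq max_mismatch allowed_bases) := by unfold Pre_create_mismatch_seqs; infer_instance

def pvWitness_create_mismatch_seqs : String × Int × String := ("ACG", 1, "ACGTN")

def Spec_create_mismatch_seqs (seq : String) (max_mismatch : Int) (allowed_bases : String) (out : List String) : Prop := out = create_mismatch_seqs_alt seq max_mismatch allowed_bases
instance (seq : String) (max_mismatch : Int) (allowed_bases : String) (out : List String) : Decidable (Spec_create_mismatch_seqs seq max_mismatch allowed_bases out) := by unfold Spec_create_mismatch_seqs; infer_instance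

-- ===== CLAIM (what is proved, stated in full; the proofs are below) =====
def Claim_equal_create_mismatch_seqs : Prop := ∀ (seq : String) (max_mismatch : Int) (allowed_bases : String), Dom_create_mismatch_seqs seq max_mismatch allowed_bases → Pre_create_mismatch_seqs seq max_mismatch allowed_bases → Spec_create_mismatch_seqs seq max_mismatch allowed_bases (create_mismatch_seqs seq max_mismatch allowed_bases)

-- ===== LEMMAS AND PROOFS =====

-- per-position factor of A's product together with B's keep-only-real-mismatches filter
def facP (ab : List Char) (S : List Int) (ib : Int × Char) : List Char × (Char → Bool) :=
  if ib.1 ∈ S then (ab, fun x => x != ib.2) else ([ib.2], fun _ => true)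

-- A's per-combination product
def PpL (ab s : List Char) (S : List Int) (k : Int) : List (List Char) :=
  prodA ((PySem.List.enumerate s k).map (fun ib => (facP ab S ib).1))

-- B's per-combination (exact-support) product
def EE (ab s : List Char) (S : List Int) (k : Int) : List (List Char) :=
  prodA ((PySem.List.enumerate s k).map (fun ib => (facP ab S ib).1.filter (facP ab S ib).2))

def strsOf (l : List (List Char)) : List String := l.map (fun p => String.ofList p)

def allB : List (List Char × (Char → Bool)) → List Char → Bool
  | [], [] => true
  | f :: fs, c :: t => f.2 c && allB fs t
  | _, _ => false

theorem facP_fst (ab : List Char) (S : List Int) (ib : Int × Char) :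
    (facP ab S ib).1 = if ib.1 ∈ S then ab else [ib.2] := by
  unfold facP; split <;> rfl

theorem combA_zero (pool : List Int) : combA pool 0 = [[]] := by cases pool <;> rfl

theorem mem_combA (pool : List Int) (n : Nat) (S : List Int) :
    S ∈ combA pool n ↔ S.Sublist pool ∧ S.length = n := by
  induction pool generalizing n S with
  | nil =>
    cases n with
    | zero =>
      simp only [combA, List.mem_singleton, List.sublist_nil, List.length_eq_zero_iff]
      tauto
    | succ n =>
      simp only [combA, List.not_mem_nil, false_iff, not_and, List.sublist_nil]
      rintro rfl; simp
  | cons x xs ih =>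
    cases n with
    | zero =>
      simp only [combA_zero, List.mem_singleton]
      constructor
      · rintro rfl; exact ⟨List.nil_sublist _, rfl⟩
      · rintro ⟨-, h⟩; exact List.length_eq_zero_iff.mp h
    | succ n =>
      simp only [combA, List.mem_append, List.mem_map, ih]
      constructor
      · rintro (⟨tl, ⟨hsub, hlen⟩, rfl⟩ | ⟨hsub, hlen⟩)
        · exact ⟨hsub.cons₂ x, by simp [hlen]⟩
        · exact ⟨hsub.cons x, hlen⟩
      · rintro ⟨hsub, hlen⟩
        cases hsub with
        | cons _ h => exact Or.inr ⟨h, hlen⟩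
        | cons₂ _ h => exact Or.inl ⟨_, ⟨h, by simpa using hlen⟩, rfl⟩

theorem combA_eq_nil (pool : List Int) (n : Nat) (h : pool.length < n) : combA pool n = [] := by
  rw [List.eq_nil_iff_forall_not_mem]
  intro S hS
  obtain ⟨hsub, hlen⟩ := (mem_combA pool n S).mp hS
  have := hsub.length_le
  omega

theorem mem_prodA (ls : List (List Char)) (t : List Char) :
    t ∈ prodA ls ↔ List.Forall₂ (fun c l => c ∈ l) t ls := by
  induction ls generalizing t with
  | nil => simp [prodA, List.forall₂_nil_right_iff]
  | cons l ls ih =>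
    simp only [prodA, List.mem_flatMap, List.mem_map, List.forall₂_cons_right_iff]
    constructor
    · rintro ⟨c, hc, t', ht', rfl⟩; exact ⟨c, t', hc, (ih t').mp ht', rfl⟩
    · rintro ⟨c, t', hc, ht', rfl⟩; exact ⟨c, hc, t', (ih t').mpr ht', rfl⟩

theorem prodA_map_singleton {α : Type} (l : List α) (f : α → Char) :
    prodA (l.map (fun x => [f x])) = [l.map f] := by
  induction l with
  | nil => rfl
  | cons a l ih => simp [prodA, ih]

theorem filter_flatMap' {α β : Type} (l : List α) (p : α → Bool) (g : α → List β) :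
    (l.filter p).flatMap g = l.flatMap (fun a => if p a then g a else []) := by
  induction l with
  | nil => rfl
  | cons a l ih => by_cases h : p a <;> simp [h, ih]

theorem prodA_filter (fs : List (List Char × (Char → Bool))) :
    prodA (fs.map (fun f => f.1.filter f.2)) = (prodA (fs.map Prod.fst)).filter (allB fs) := by
  induction fs with
  | nil => simp [prodA, allB]
  | cons f fs ih =>
    simp only [List.map_cons, prodA, List.filter_flatMap, filter_flatMap', ih]
    refine List.flatMap_congr (fun c _ => ?_)
    have hcons : ∀ t, allB (f :: fs) (c :: t) = (f.2 c && allB fs t) := fun t => rfl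
    rw [show (List.filter (allB (f :: fs)) (List.map (fun t => c :: t) (prodA (fs.map Prod.fst))))
        = List.map (fun t => c :: t) (((prodA (fs.map Prod.fst))).filter ((allB (f :: fs)) ∘ (fun t => c :: t))) from List.filter_map]
    by_cases h : f.2 c
    · simp only [h, if_pos trivial, Function.comp_def, hcons, Bool.true_and]
    · simp only [h, Bool.false_eq_true, if_false, Function.comp_def, hcons, Bool.false_and,
        List.filter_false, List.map_nil]

theorem EE_nil (ab s : List Char) (k : Int) : EE ab s [] k = [s] := by
  unfold EE
  have hfac : ((PySem.List.enumerate s k).map (fun ib => (facP ab [] ib).1.filter (facP ab [] ib).2))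
      = (PySem.List.enumerate s k).map (fun ib => [ib.2]) :=
    List.map_congr_left (fun ib _ => by simp [facP])
  rw [hfac]
  exact (prodA_map_singleton (PySem.List.enumerate s k) (fun x => x.2)).trans
    (by rw [PySem.List.map_snd_enumerate])

theorem EE_cons_mem (ab : List Char) (c : Char) (tail : List Char) (S' : List Int) (k : Int) :
    EE ab (c :: tail) (k :: S') k
      = (ab.filter (fun x => x != c)).flatMap (fun x => (EE ab tail S' (k + 1)).map (fun t => x :: t)) := by
  unfold EE
  rw [PySem.List.enumerate_cons, List.map_cons]
  have h0 : (facP ab (k :: S') (k, c)).1.filter (facP ab (k :: S') (k, c)).2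
      = ab.filter (fun x => x != c) := by simp [facP]
  have htf : ((PySem.List.enumerate tail (k + 1)).map
        (fun ib => (facP ab (k :: S') ib).1.filter (facP ab (k :: S') ib).2))
      = ((PySem.List.enumerate tail (k + 1)).map
        (fun ib => (facP ab S' ib).1.filter (facP ab S' ib).2)) := by
    refine List.map_congr_left (fun ib hib => ?_)
    obtain ⟨j, hj, rfl⟩ := (PySem.List.mem_enumerate_iff tail (k + 1) ib).mp hib
    have hne : (k + 1 + (j : Int)) ≠ k := by omega
    simp only [facP, List.mem_cons, hne, false_or]
  rw [h0, htf]
  simp [prodA]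

theorem EE_cons_not_mem (ab : List Char) (c : Char) (tail : List Char) (S : List Int) (k : Int)
    (hS : k ∉ S) :
    EE ab (c :: tail) S k = (EE ab tail S (k + 1)).map (fun t => c :: t) := by
  unfold EE
  rw [PySem.List.enumerate_cons, List.map_cons]
  have h0 : (facP ab S (k, c)).1.filter (facP ab S (k, c)).2 = [c] := by simp [facP, hS]
  rw [h0]
  simp [prodA]

theorem goB_eq (ab : List Char) (s : List Char) (n : Nat) (k : Int) :
    goB ab s n = (combA (PySem.List.pyRange k (k + s.length) 1) n).map (fun S => EE ab s S k) := by
  induction s generalizing n k with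
  | nil =>
    cases n with
    | zero =>
      rw [show ((k : Int) + (([] : List Char).length : Int)) = k by simp,
        PySem.List.pyRange_one_eq_nil le_rfl, combA_zero]
      simp [goB, EE_nil]
    | succ n =>
      rw [show ((k : Int) + (([] : List Char).length : Int)) = k by simp,
        PySem.List.pyRange_one_eq_nil le_rfl]
      rfl
  | cons c tail ih =>
    have harg : (k + (((c :: tail).length : Nat) : Int)) = (k + 1) + (tail.length : Int) := by
      push_cast [List.length_cons]; ring
    cases n with
    | zero => rw [combA_zero]; simp [goB, EE_nil]
    | succ b =>
      rw [harg, PySem.List.pyRange_one_cons (by omega)]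
      show goB ab (c :: tail) (b + 1) = (combA (k :: PySem.List.pyRange (k + 1) (k + 1 + ↑tail.length) 1) (b + 1)).map _
      rw [show combA (k :: PySem.List.pyRange (k + 1) (k + 1 + ↑tail.length) 1) (b + 1)
          = (combA (PySem.List.pyRange (k + 1) (k + 1 + ↑tail.length) 1) b).map (fun t => k :: t)
            ++ combA (PySem.List.pyRange (k + 1) (k + 1 + ↑tail.length) 1) (b + 1) from rfl,
        List.map_append, List.map_map]
      show (goB ab tail b).map _ ++ _ = _
      congr 1
      · rw [ih b (k + 1), List.map_map]
        refine List.map_congr_left (fun S' _ => ?_)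
        simp only [Function.comp_apply]
        rw [EE_cons_mem ab c tail S' k]
      · by_cases hguard : b + 1 ≤ tail.length
        · rw [if_pos hguard, ih (b + 1) (k + 1), List.map_map]
          refine List.map_congr_left (fun S hS => ?_)
          obtain ⟨hsub, -⟩ := (mem_combA _ _ _).mp hS
          have hk : k ∉ S := fun hkS => by
            have := (PySem.List.mem_pyRange_one).mp (hsub.subset hkS); omega
          simp only [Function.comp_apply]
          rw [EE_cons_not_mem ab c tail S k hk]
        · rw [if_neg hguard, combA_eq_nil _ _ (by
            rw [PySem.List.length_pyRange_one]; omega)]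
          rfl

theorem allB_eq_true (fs : List (List Char × (Char → Bool))) :
    ∀ (t : List Char), fs.length = t.length →
    (allB fs t = true ↔ ∀ (i : Nat) (h : i < fs.length) (h' : i < t.length), fs[i].2 t[i] = true) := by
  induction fs with
  | nil => intro t ht; cases t with
    | nil => simp [allB]
    | cons c t => simp at ht
  | cons f fs ih =>
    intro t ht
    cases t with
    | nil => simp at ht
    | cons c t =>
      have hlen : fs.length = t.length := by simpa using ht
      have : allB (f :: fs) (c :: t) = (f.2 c && allB fs t) := rfl
      rw [this, Bool.and_eq_true, ih t hlen]
      constructor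
      · rintro ⟨h0, hrest⟩ i hi hi'
        cases i with
        | zero => simpa using h0
        | succ i => simpa using hrest i (by simpa using hi) (by simpa using hi')
      · intro h
        refine ⟨by simpa using h 0 (by simp) (by simp), fun i hi hi' => ?_⟩
        simpa using h (i + 1) (by simpa using hi) (by simpa using hi')

theorem mem_PpL0 (ab s : List Char) (S : List Int) (t : List Char) :
    t ∈ PpL ab s S 0 ↔ t.length = s.length ∧
      ∀ i < s.length,
        (((i : Int) ∈ S → t.getD i ' ' ∈ ab) ∧ (((i : Int) ∉ S) → t.getD i ' ' = s.getD i ' ')) := by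
  unfold PpL
  rw [mem_prodA, List.forall₂_iff_get]
  simp only [List.length_map, PySem.List.length_enumerate, List.get_eq_getElem]
  constructor
  · rintro ⟨hlen, h⟩
    refine ⟨hlen, fun i hi => ?_⟩
    have h' := h i (by omega) (by simpa using hi)
    rw [List.getElem_map, PySem.List.getElem_enumerate _ _ _ (by simpa using hi), facP_fst] at h'
    simp only [zero_add] at h'
    rw [List.getD_eq_getElem t ' ' (by omega), List.getD_eq_getElem s ' ' hi]
    by_cases hmem : (i : Int) ∈ S
    · refine ⟨fun _ => ?_, fun hn => absurd hmem hn⟩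
      rwa [if_pos hmem] at h'
    · refine ⟨fun hy => absurd hy hmem, fun _ => ?_⟩
      rw [if_neg hmem] at h'
      simpa using h'
  · rintro ⟨hlen, h⟩
    refine ⟨by simpa using hlen, fun i hi hi' => ?_⟩
    have hi'' : i < s.length := by simpa using hi'
    have h' := h i hi''
    rw [List.getD_eq_getElem t ' ' (by omega), List.getD_eq_getElem s ' ' hi''] at h'
    rw [List.getElem_map, PySem.List.getElem_enumerate _ _ _ (by simpa using hi'), facP_fst]
    simp only [zero_add]
    by_cases hmem : (i : Int) ∈ S
    · rw [if_pos hmem]; exact h'.1 hmem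
    · rw [if_neg hmem]; simpa using h'.2 hmem

theorem allB_false (ab s : List Char) (S : List Int) (t : List Char) (hlen : t.length = s.length)
    (h : allB ((PySem.List.enumerate s 0).map (facP ab S)) t = false) :
    ∃ i < s.length, (i : Int) ∈ S ∧ t.getD i ' ' = s.getD i ' ' := by
  have hfs : ((PySem.List.enumerate s 0).map (facP ab S)).length = t.length := by
    simp [hlen]
  have hnot : ¬ ∀ (i : Nat) (hi : i < ((PySem.List.enumerate s 0).map (facP ab S)).length)
      (hi' : i < t.length), (((PySem.List.enumerate s 0).map (facP ab S))[i]).2 t[i] = true := by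
    intro hall
    have := (allB_eq_true _ t hfs).mpr hall
    rw [h] at this
    exact Bool.false_ne_true this
  simp only [not_forall] at hnot
  obtain ⟨i, hi, hi', hne⟩ := hnot
  have his : i < s.length := by simpa using hi
  refine ⟨i, his, ?_⟩
  rw [List.getElem_map, PySem.List.getElem_enumerate _ _ _ (by simpa using hi)] at hne
  unfold facP at hne
  simp only [zero_add] at hne
  by_cases hmem : (i : Int) ∈ S
  · rw [if_pos hmem] at hne
    refine ⟨hmem, ?_⟩
    rw [List.getD_eq_getElem t ' ' hi', List.getD_eq_getElem s ' ' his]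
    exact bne_eq_false_iff_eq.mp (Bool.not_eq_true _ |>.mp hne)
  · rw [if_neg hmem] at hne
    exact absurd rfl hne

theorem update_filter (l : List String) (p : String → Bool) :
    ∀ (acc : List String), (∀ x ∈ l, p x = false → x ∈ acc) →
    PySem.Set.update acc (l.filter p) = PySem.Set.update acc l := by
  induction l with
  | nil => intro acc _; rfl
  | cons x l ih =>
    intro acc hacc
    by_cases h : p x
    · rw [List.filter_cons_of_pos h, PySem.Set.update_cons, PySem.Set.update_cons]
      exact ih _ (fun y hy hpy => (PySem.Set.mem_add acc x y).mpr
        (Or.inl (hacc y (List.mem_cons_of_mem x hy) hpy)))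
    · rw [List.filter_cons_of_neg (by simpa using h), PySem.Set.update_cons,
        PySem.Set.add_of_mem (hacc x (List.mem_cons_self) (by simpa using h))]
      exact ih _ (fun y hy hpy => hacc y (List.mem_cons_of_mem x hy) hpy)

theorem mem_foldl_gen {β : Type} (l : List β) (F : List String → β → List String)
    (G : β → String → Prop) (y : String)
    (hF : ∀ a b, y ∈ F a b ↔ y ∈ a ∨ G b y) :
    ∀ acc, y ∈ l.foldl F acc ↔ y ∈ acc ∨ ∃ b ∈ l, G b y := by
  induction l with
  | nil => simp
  | cons b l ih =>
    intro acc
    rw [List.foldl_cons, ih, hF]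
    simp only [List.mem_cons]
    constructor
    · rintro ((h | h) | ⟨b', hb', h⟩)
      · exact Or.inl h
      · exact Or.inr ⟨b, Or.inl rfl, h⟩
      · exact Or.inr ⟨b', Or.inr hb', h⟩
    · rintro (h | ⟨b', (rfl | hb'), h⟩)
      · exact Or.inl (Or.inl h)
      · exact Or.inl (Or.inr h)
      · exact Or.inr ⟨b', hb', h⟩

-- strings already reachable with fewer than n mismatches
def LowP (ab s : List Char) (n : Nat) (x : String) : Prop :=
  ∃ kk : Nat, kk < n ∧ ∃ S ∈ combA (PySem.List.pyRange 0 (s.length : Int) 1) kk,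
    x ∈ strsOf (PpL ab s S 0)

theorem combo_update (ab s : List Char) (n : Nat) (S : List Int) (acc : List String)
    (hS : S ∈ combA (PySem.List.pyRange 0 (s.length : Int) 1) n)
    (hacc : ∀ x, LowP ab s n x → x ∈ acc) :
    PySem.Set.update acc (strsOf (PpL ab s S 0)) = PySem.Set.update acc (strsOf (EE ab s S 0)) := by
  have hEE : EE ab s S 0
      = (PpL ab s S 0).filter (allB ((PySem.List.enumerate s 0).map (facP ab S))) := by
    unfold EE PpL
    have base := prodA_filter ((PySem.List.enumerate s 0).map (facP ab S))
    simpa only [List.map_map, Function.comp_def] using base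
  have hstr : strsOf (EE ab s S 0)
      = (strsOf (PpL ab s S 0)).filter
          (fun x => allB ((PySem.List.enumerate s 0).map (facP ab S)) x.toList) := by
    rw [hEE]
    unfold strsOf
    rw [List.filter_map]
    congr 1
    apply List.filter_congr
    intro t _
    simp
  rw [hstr]
  refine (update_filter _ _ acc ?_).symm
  intro x hx hpx
  obtain ⟨t, ht, rfl⟩ := List.mem_map.mp hx
  obtain ⟨hlen, hprop⟩ := (mem_PpL0 ab s S t).mp ht
  obtain ⟨i, hi, hiS, heq⟩ := allB_false ab s S t hlen (by simpa using hpx)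
  obtain ⟨hsub, hlenS⟩ := (mem_combA _ _ _).mp hS
  have hnodup : S.Nodup := hsub.nodup (PySem.List.nodup_pyRange_one _ _)
  have hSne : 1 ≤ S.length := by
    cases S with
    | nil => simp at hiS
    | cons a S => simp
  refine hacc _ ⟨S.length - 1, by omega, S.erase (i : Int),
    (mem_combA _ _ _).mpr ⟨(List.erase_sublist).trans hsub, List.length_erase_of_mem hiS⟩, ?_⟩
  refine List.mem_map.mpr ⟨t, (mem_PpL0 ab s (S.erase (i : Int)) t).mpr ⟨hlen, fun p hp => ?_⟩, rfl⟩
  constructor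
  · intro hpmem
    exact (hprop p hp).1 (List.mem_of_mem_erase hpmem)
  · intro hpnot
    by_cases hpS : (p : Int) ∈ S
    · have : (p : Int) = (i : Int) := by
        by_contra hne
        exact hpnot ((hnodup.mem_erase_iff).mpr ⟨hne, hpS⟩)
      have hpi : p = i := by exact_mod_cast this
      subst hpi
      exact heq
    · exact (hprop p hp).2 hpS

theorem layer_eq (ab s : List Char) (n : Nat) :
    ∀ (combos : List (List Int)) (acc : List String),
    (∀ S ∈ combos, S ∈ combA (PySem.List.pyRange 0 (s.length : Int) 1) n) →
    (∀ x, LowP ab s n x → x ∈ acc) →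
    combos.foldl (fun a S => PySem.Set.update a (strsOf (PpL ab s S 0))) acc
      = combos.foldl (fun a S => PySem.Set.update a (strsOf (EE ab s S 0))) acc := by
  intro combos
  induction combos with
  | nil => intro acc _ _; rfl
  | cons S combos ih =>
    intro acc hcombos hacc
    rw [List.foldl_cons, List.foldl_cons,
      combo_update ab s n S acc (hcombos S List.mem_cons_self) hacc]
    exact ih _ (fun S' h => hcombos S' (List.mem_cons_of_mem S h))
      (fun x hx => (PySem.Set.mem_update _ _ _).mpr (Or.inl (hacc x hx)))

theorem memA_iff (ab s : List Char) (N : Nat) (x : String) :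
    x ∈ (List.range N).foldl (fun result n =>
        (combA (PySem.List.pyRange 0 (s.length : Int) 1) n).foldl
          (fun result locs => PySem.Set.update result (strsOf (PpL ab s locs 0))) result) ([] : List String)
      ↔ LowP ab s N x := by
  rw [mem_foldl_gen (List.range N) _ (fun n y => ∃ S ∈ combA (PySem.List.pyRange 0 (s.length : Int) 1) n,
      y ∈ strsOf (PpL ab s S 0)) x (fun a n => by
    rw [mem_foldl_gen _ _ (fun S y => y ∈ strsOf (PpL ab s S 0)) x
      (fun a' S => PySem.Set.mem_update a' _ x)])]
  unfold LowP
  simp [List.mem_range]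

theorem main_fold (ab s : List Char) (N : Nat) :
    (List.range N).foldl (fun result n =>
        (combA (PySem.List.pyRange 0 (s.length : Int) 1) n).foldl
          (fun result locs => PySem.Set.update result (strsOf (PpL ab s locs 0))) result) ([] : List String)
      = (List.range N).foldl (fun result n =>
          (goB ab s n).foldl (fun result g => PySem.Set.update result (strsOf g)) result) ([] : List String) := by
  induction N with
  | zero => rfl
  | succ N ih =>
    rw [List.range_succ, List.foldl_append, List.foldl_append, ← ih,
      List.foldl_cons, List.foldl_nil, List.foldl_cons, List.foldl_nil]
    have hgo : goB ab s N = (combA (PySem.List.pyRange 0 (s.length : Int) 1) N).map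
        (fun S => EE ab s S 0) := by
      have := goB_eq ab s N 0
      rwa [zero_add] at this
    rw [hgo, List.foldl_map]
    exact layer_eq ab s N _ _ (fun S h => h) (fun x hx => (memA_iff ab s N x).mpr hx)

-- ===== VERDICT =====
theorem create_mismatch_seqs_spec : Claim_equal_create_mismatch_seqs := by
  intro seq max_mismatch allowed_bases _ _
  unfold Spec_create_mismatch_seqs create_mismatch_seqs create_mismatch_seqs_alt
  rw [PySem.List.pyRange_one 0 (max_mismatch + 1), List.foldl_map, List.foldl_map]
  simp only [zero_add, Int.toNat_natCast]
  have := main_fold allowed_bases.toList seq.toList (max_mismatch + 1 - 0).toNat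
  simp only [strsOf, PpL, facP_fst] at this
  exact this
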